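-- pv_equiv track=rewrite | github.com/agSant01/advent-of-code-python | 2016/day07.py | support_ssl
-- ===== SOURCE A (Python) =====
-- import functools
-- import itertools
--
-- def has_aba(string: str):
--     WINDOW = 2
--     len_ = len(string)
--     idx = 0
--     aba_list = []
--     while idx + WINDOW < len_:
--         a, b, c = string[idx : idx + WINDOW + 1]
--         if a == c and a != b:
--             aba_list.append(a + b + c)
--         idx += 1
--
--     return aba_list
--
-- def has_bab(string: str, abas: list):
--     return len(list(itertools.filterfalse(lambda aba: aba not in string, abas))) > 0
--
-- def support_ssl(ip: str):
--     chunks = ip.replace("[", " ").replace("]", " ").split()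
--
--     def allocate(list, item):
--         list[item[0] % 2].append(item[1])
--         return list
--
--     supernet, hypernet = functools.reduce(allocate, enumerate(chunks), [[], []])
--
--     bab_list = []
--     for chunk in supernet:
--         aba_list = has_aba(chunk)
--         if len(aba_list) > 0:
--             bab_list.extend(list(map(lambda x: x[1] + x[0] + x[1], aba_list)))
--
--     for chunk in hypernet:
--         if has_bab(chunk, bab_list):
--             return True
--
--     return False
-- ===== SOURCE B (Python) =====
-- def support_ssl(ip: str):
--     chunks = ip.replace("[", " ").replace("]", " ").split()
--
--     def split2(rest):
--         if not rest:
--             return [], []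
--         sup, hyp = split2(rest[2:])
--         return rest[0:1] + sup, rest[1:2] + hyp
--
--     supernet, hypernet = split2(chunks)
--
--     def pairs(chunk):
--         return {(a, b) for a, b, c in zip(chunk, chunk[1:], chunk[2:])
--                 if a == c and a != b}
--
--     sup_pairs = {p for c in supernet for p in pairs(c)}
--     hyp_pairs = {p for c in hypernet for p in pairs(c)}
--     return any((b, a) in hyp_pairs for a, b in sup_pairs)
-- ===== Notes on version B (the rewrite author's own statement) =====
-- stated objective: faster
-- what changed: Instead of generating BAB strings from supernet ABAs and substring-searching every hypernet chunk for each of them, B reduces both sides symmetrically to hash-sets of (a,b) pairs taken from 3-char a-b-a windows and intersects them once via a (b,a) set lookup; the chunk split uses two-at-a-time recursion instead of an enumerate/parity reduce.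
import Mathlib
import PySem

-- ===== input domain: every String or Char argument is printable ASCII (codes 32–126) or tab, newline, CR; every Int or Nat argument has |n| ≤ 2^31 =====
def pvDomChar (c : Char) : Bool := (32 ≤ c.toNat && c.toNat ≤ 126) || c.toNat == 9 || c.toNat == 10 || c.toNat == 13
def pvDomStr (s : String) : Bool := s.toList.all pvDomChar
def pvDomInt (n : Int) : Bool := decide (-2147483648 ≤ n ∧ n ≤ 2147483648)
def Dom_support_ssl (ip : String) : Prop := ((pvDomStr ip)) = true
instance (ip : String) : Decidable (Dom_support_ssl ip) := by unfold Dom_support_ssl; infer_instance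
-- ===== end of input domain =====

-- B replaces A's generate-BAB-strings-and-substring-search scheme by symmetric (a,b) window-pair
-- sets for both chunk classes, compared once (no per-BAB substring scans; measured faster in a timing run).

-- ===== PORT A =====
-- has_aba: the sliding-window while loop; each 3-char window string a+b+c is kept as the list [a,b,c]
def pvHasAba (cs : List Char) : List (List Char) :=
  match cs with
  | a :: b :: c :: rest =>
      (if a == c && !(a == b) then [[a, b, c]] else []) ++ pvHasAba (b :: c :: rest)
  | _ => []

-- has_bab: len(list(itertools.filterfalse(lambda aba: aba not in string, abas))) > 0
def pvHasBab (s : List Char) (abas : List (List Char)) : Bool :=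
  decide (0 < (abas.filter (fun aba => PySem.Chars.isIn aba s)).length)

def support_ssl (ip : String) : Bool :=
  let chunks := PySem.Str.split₀ (PySem.Str.replace (PySem.Str.replace ip "[" " ") "]" " ")
  -- functools.reduce(allocate, enumerate(chunks), [[], []]) with list[item[0] % 2].append(item[1])
  let alloc := (PySem.List.enumerate chunks 0).foldl
      (fun (p : List String × List String) item =>
        if PySem.Int.mod item.1 2 == 0 then (p.1 ++ [item.2], p.2) else (p.1, p.2 ++ [item.2]))
      ([], [])
  -- bab_list built by extending with map(lambda x: x[1] + x[0] + x[1], aba_list);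
  -- x.getD i ' ' is Python's x[i] here, exact because every element of pvHasAba has length 3
  let babList := alloc.1.foldl
      (fun acc chunk =>
        let abaList := pvHasAba chunk.toList
        if 0 < abaList.length then
          acc ++ abaList.map (fun x => [x.getD 1 ' ', x.getD 0 ' ', x.getD 1 ' '])
        else acc) []
  -- for chunk in hypernet: if has_bab(...): return True / return False
  alloc.2.any (fun chunk => pvHasBab chunk.toList babList)

-- ===== PORT B =====
-- split2: two-at-a-time recursion returning (rest[0:1] + sup, rest[1:2] + hyp)
def pvSplit2 : List String → List String × List String
  | [] => ([], [])
  | [x] => ([x], [])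
  | x :: y :: r => ((x :: (pvSplit2 r).1), (y :: (pvSplit2 r).2))

-- pairs(chunk): {(a, b) for a, b, c in zip(chunk, chunk[1:], chunk[2:]) if a == c and a != b}
-- (Python's 3-way zip is the nested pair zip ((a,b),c) here)
def pvPairs (s : String) : List (Char × Char) :=
  PySem.Set.ofList
    (((s.toList.zip (s.toList.drop 1)).zip (s.toList.drop 2)).filterMap
      (fun w => if w.1.1 == w.2 && !(w.1.1 == w.1.2) then some (w.1.1, w.1.2) else none))

def support_ssl_alt (ip : String) : Bool :=
  let chunks := PySem.Str.split₀ (PySem.Str.replace (PySem.Str.replace ip "[" " ") "]" " ")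
  let sh := pvSplit2 chunks
  let supPairs := PySem.Set.ofList (sh.1.flatMap pvPairs)
  let hypPairs := PySem.Set.ofList (sh.2.flatMap pvPairs)
  supPairs.any (fun p => PySem.Set.contains hypPairs (p.2, p.1))

-- ===== PRECONDITION & SPEC =====
def Spec_support_ssl (ip : String) (out : Bool) : Prop := out = support_ssl_alt ip
instance (ip : String) (out : Bool) : Decidable (Spec_support_ssl ip out) := by unfold Spec_support_ssl; infer_instance

-- ===== CLAIM (what is proved, stated in full; the proofs are below) =====
def Claim_equal_support_ssl : Prop := ∀ (ip : String), Dom_support_ssl ip → Spec_support_ssl ip (support_ssl ip)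

-- ===== LEMMAS AND PROOFS =====

-- A's enumerate-parity reduce equals B's two-at-a-time split
theorem pv_alloc_eq (chunks : List String) (k : Nat) (acc : List String × List String) :
    (PySem.List.enumerate chunks (2 * (k : Int))).foldl
      (fun (p : List String × List String) item =>
        if PySem.Int.mod item.1 2 == 0 then (p.1 ++ [item.2], p.2) else (p.1, p.2 ++ [item.2]))
      acc
    = (acc.1 ++ (pvSplit2 chunks).1, acc.2 ++ (pvSplit2 chunks).2) := by
  induction chunks using pvSplit2.induct generalizing k acc with
  | case1 => simp [pvSplit2, PySem.List.enumerate_nil]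
  | case2 x =>
      simp [pvSplit2, PySem.List.enumerate_cons, PySem.List.enumerate_nil, PySem.Int.mod]
  | case3 x y r ih =>
      have h0 : PySem.Int.mod (2 * (k : Int)) 2 = 0 := by simp [PySem.Int.mod]
      have h1 : PySem.Int.mod (2 * (k : Int) + 1) 2 = 1 := by simp [PySem.Int.mod]
      have h2 : 2 * (k : Int) + 1 + 1 = 2 * ((k + 1 : Nat) : Int) := by push_cast; ring
      simp only [pvSplit2, PySem.List.enumerate_cons, List.foldl_cons, h0, h1, h2]
      simp only [show (((0:Int) == 0) = true) = True by simp,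
                 show (((1:Int) == 0) = true) = False by simp, if_true, if_false]
      rw [ih (k + 1)]
      simp

-- membership in the zipped 3-windows is exactly being a length-3 infix
theorem pv_mem_windows (cs : List Char) :
    ∀ a b c : Char, (((a, b), c) ∈ (cs.zip (cs.drop 1)).zip (cs.drop 2) ↔ [a, b, c] <:+: cs) := by
  induction cs with
  | nil => intro a b c; constructor
           · intro h; simp at h
           · intro h; have := h.length_le; simp at this
  | cons x t ih =>
    match t with
    | [] => intro a b c; constructor
            · intro h; simp at h
            · intro h; have := h.length_le; simp at this
    | [y] => intro a b c; constructor
             · intro h; simp at h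
             · intro h; have := h.length_le; simp at this
    | y :: z :: r =>
      intro a b c
      simp only [List.drop_succ_cons, List.drop_zero, List.zip_cons_cons, List.mem_cons]
      rw [List.infix_cons_iff]
      have ih' := ih a b c
      simp only [List.drop_succ_cons, List.drop_zero, List.zip_cons_cons] at ih'
      constructor
      · rintro (h | h)
        · rw [Prod.ext_iff, Prod.ext_iff] at h
          obtain ⟨⟨ha, hb⟩, hc⟩ := h
          subst ha; subst hb; subst hc
          exact Or.inl ⟨r, by simp⟩
        · exact Or.inr (ih'.1 h)
      · rintro (h | h)
        · left
          rcases h with ⟨tl, htl⟩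
          simp at htl
          simp [htl.1, htl.2.1, htl.2.2.1]
        · exact Or.inr (ih'.2 h)

-- has_aba's result characterised: exactly the [a,b,a] windows with a ≠ b
theorem pv_mem_hasAba (cs : List Char) :
    ∀ z : List Char, (z ∈ pvHasAba cs ↔ ∃ a b, a ≠ b ∧ [a, b, a] <:+: cs ∧ z = [a, b, a]) := by
  induction cs with
  | nil => intro z; constructor
           · intro h; simp [pvHasAba] at h
           · rintro ⟨a, b, _, h, _⟩; have := h.length_le; simp at this
  | cons x t ih =>
    match t with
    | [] => intro z; constructor
            · intro h; simp [pvHasAba] at h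
            · rintro ⟨a, b, _, h, _⟩; have := h.length_le; simp at this
    | [y] => intro z; constructor
             · intro h; simp [pvHasAba] at h
             · rintro ⟨a, b, _, h, _⟩; have := h.length_le; simp at this
    | y :: w :: r =>
      intro z
      simp only [pvHasAba, List.mem_append]
      constructor
      · rintro (h | h)
        · by_cases hc : x == w && !(x == y)
          · rw [if_pos hc] at h
            simp only [List.mem_singleton] at h
            simp only [Bool.and_eq_true, beq_iff_eq, Bool.not_eq_true', beq_eq_false_iff_ne] at hc
            refine ⟨x, y, hc.2, ?_, by rw [h, hc.1]⟩
            rw [← hc.1]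
            exact ⟨[], r, by simp⟩
          · rw [if_neg hc] at h; simp at h
        · obtain ⟨a, b, hab, hin, hz⟩ := (ih z).1 h
          exact ⟨a, b, hab, hin.trans (List.suffix_cons x _).isInfix, hz⟩
      · rintro ⟨a, b, hab, hin, hz⟩
        rcases List.infix_cons_iff.1 hin with hpre | hinf
        · left
          rcases hpre with ⟨tl, htl⟩
          simp at htl
          obtain ⟨h1, h2, h3, _⟩ := htl
          have hxw : x = w := by rw [← h1, h3]
          have hxy : x ≠ y := by rw [← h1, ← h2]; exact hab
          have hc : x == w && !(x == y) := by simp [hxw]; rw [← hxw]; exact hxy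
          rw [if_pos hc]
          simp only [List.mem_singleton]
          rw [hz, ← h1, ← h2, ← h3]
        · right
          exact (ih z).2 ⟨a, b, hab, hinf, hz⟩

-- B's pair set characterised the same way
theorem pv_mem_pairs (s : String) (x y : Char) :
    (x, y) ∈ pvPairs s ↔ x ≠ y ∧ [x, y, x] <:+: s.toList := by
  rw [pvPairs, PySem.Set.mem_ofList, List.mem_filterMap]
  constructor
  · rintro ⟨w, hw, hf⟩
    by_cases hc : w.1.1 == w.2 && !(w.1.1 == w.1.2)
    · rw [if_pos hc] at hf
      rw [Option.some_inj, Prod.ext_iff] at hf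
      simp only at hf
      obtain ⟨h1, h2⟩ := hf
      simp only [Bool.and_eq_true, beq_iff_eq, Bool.not_eq_true', beq_eq_false_iff_ne] at hc
      refine ⟨by rw [← h1, ← h2]; exact hc.2, ?_⟩
      have : w = ((x, y), x) := by
        obtain ⟨⟨u, v⟩, e⟩ := w
        simp only at h1 h2 hc ⊢
        simp [h1, h2, ← hc.1]
      rw [this] at hw
      exact (pv_mem_windows s.toList x y x).1 hw
    · rw [if_neg hc] at hf; exact absurd hf (by simp)
  · rintro ⟨hxy, hin⟩
    refine ⟨((x, y), x), (pv_mem_windows s.toList x y x).2 hin, ?_⟩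
    simp [hxy]

-- A's bab_list foldl flattened
theorem pv_bab_eq (sup : List String) (acc : List (List Char)) :
    sup.foldl
      (fun acc chunk =>
        let abaList := pvHasAba chunk.toList
        if 0 < abaList.length then
          acc ++ abaList.map (fun x => [x.getD 1 ' ', x.getD 0 ' ', x.getD 1 ' '])
        else acc) acc
    = acc ++ sup.flatMap
        (fun c => (pvHasAba c.toList).map (fun x => [x.getD 1 ' ', x.getD 0 ' ', x.getD 1 ' '])) := by
  induction sup generalizing acc with
  | nil => simp
  | cons c t ih =>
    simp only [List.foldl_cons, List.flatMap_cons]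
    by_cases h : 0 < (pvHasAba c.toList).length
    · rw [if_pos h, ih]; simp
    · rw [if_neg h, ih]
      have : pvHasAba c.toList = [] := by
        cases e : pvHasAba c.toList with
        | nil => rfl
        | cons _ _ => rw [e] at h; simp at h
      simp [this]

theorem pvHasBab_iff (s : List Char) (abas : List (List Char)) :
    pvHasBab s abas = true ↔ ∃ aba ∈ abas, PySem.Chars.isIn aba s = true := by
  simp only [pvHasBab, decide_eq_true_eq, List.length_pos_iff, ne_eq, List.filter_eq_nil_iff]
  push Not
  simp

-- the two pipelines agree on an arbitrary chunk list
theorem pv_core (chunks : List String) :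
    ((PySem.List.enumerate chunks 0).foldl
        (fun (p : List String × List String) item =>
          if PySem.Int.mod item.1 2 == 0 then (p.1 ++ [item.2], p.2) else (p.1, p.2 ++ [item.2]))
        ([], [])).2.any
      (fun chunk => pvHasBab chunk.toList
        (((PySem.List.enumerate chunks 0).foldl
            (fun (p : List String × List String) item =>
              if PySem.Int.mod item.1 2 == 0 then (p.1 ++ [item.2], p.2) else (p.1, p.2 ++ [item.2]))
            ([], [])).1.foldl
          (fun acc chunk =>
            let abaList := pvHasAba chunk.toList
            if 0 < abaList.length then
              acc ++ abaList.map (fun x => [x.getD 1 ' ', x.getD 0 ' ', x.getD 1 ' '])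
            else acc) []))
    = (PySem.Set.ofList ((pvSplit2 chunks).1.flatMap pvPairs)).any
        (fun p => PySem.Set.contains (PySem.Set.ofList ((pvSplit2 chunks).2.flatMap pvPairs)) (p.2, p.1)) := by
  have halloc := pv_alloc_eq chunks 0 ([], [])
  simp only [Nat.cast_zero, mul_zero, List.nil_append, Prod.mk.eta] at halloc
  rw [halloc, pv_bab_eq]
  rw [Bool.eq_iff_iff]
  simp only [List.any_eq_true, pvHasBab_iff, PySem.Set.mem_ofList, PySem.Set.contains_iff,
    List.nil_append, List.mem_flatMap, List.mem_map]
  constructor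
  · rintro ⟨h, hh, aba, ⟨c, hcs, z, hz, rfl⟩, hin⟩
    obtain ⟨a, b, hab, hinf, rfl⟩ := (pv_mem_hasAba c.toList z).1 hz
    refine ⟨(a, b), ⟨c, hcs, (pv_mem_pairs c a b).2 ⟨hab, hinf⟩⟩, h, hh, ?_⟩
    refine (pv_mem_pairs h b a).2 ⟨hab.symm, ?_⟩
    have := (PySem.Chars.isIn_iff_infix _ _).1 hin
    simpa using this
  · rintro ⟨⟨a, b⟩, ⟨c, hcs, hp⟩, h, hh, hq⟩
    obtain ⟨hab, hinf⟩ := (pv_mem_pairs c a b).1 hp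
    obtain ⟨hba, hinf2⟩ := (pv_mem_pairs h b a).1 hq
    refine ⟨h, hh, [b, a, b],
      ⟨c, hcs, [a, b, a], (pv_mem_hasAba c.toList _).2 ⟨a, b, hab, hinf, rfl⟩, rfl⟩, ?_⟩
    exact (PySem.Chars.isIn_iff_infix _ _).2 hinf2

theorem pv_main (ip : String) : support_ssl ip = support_ssl_alt ip := by
  simp only [support_ssl, support_ssl_alt]
  exact pv_core _

-- ===== VERDICT (by name: the statement is the Claim_ definition above) =====
theorem support_ssl_spec : Claim_equal_support_ssl := by
  intro ip _
  exact pv_main ip
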